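-- pv_equiv track=rewrite | github.com/FlavRotary/childspeak-python | childspeak.py | rule4
-- ===== SOURCE A (Python) =====
-- VOWELS = ['a', 'e', 'i', 'o', 'u', 'y']
--
-- def rule4(input_string: str) -> str:
--     reversed = input_string[::-1]
--     current = 1
--     while current < len(reversed):
--         if reversed[current] in VOWELS and reversed[current-1] in VOWELS:
--             reversed = reversed[:current] + reversed[current+1:]
--         current += 1
--     return reversed[::-1]
-- ===== SOURCE B (Python) =====
-- def rule4(input_string: str) -> str:
--     vowels = set("aeiouy")
--     out = []
--     i = 0
--     n = len(input_string)
--     while i < n: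
--         c = input_string[i]
--         if c not in vowels:
--             out.append(c)
--             i += 1
--         else:
--             j = i + 1
--             while j < n and input_string[j] in vowels:
--                 j += 1
--             run = input_string[i:j]
--             out.append(run[(j - i + 1) % 2::2])
--             i = j
--     return "".join(out)
-- ===== Notes on version B (the rewrite author's own statement) =====
-- stated objective: faster
-- what changed: A repeatedly rebuilds the reversed string with slicing inside its scan (quadratic in the worst case); B makes one forward pass that finds each maximal vowel run and keeps every other character of the run counted from its right end, never reversing or rebuilding.
import Mathlib
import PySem

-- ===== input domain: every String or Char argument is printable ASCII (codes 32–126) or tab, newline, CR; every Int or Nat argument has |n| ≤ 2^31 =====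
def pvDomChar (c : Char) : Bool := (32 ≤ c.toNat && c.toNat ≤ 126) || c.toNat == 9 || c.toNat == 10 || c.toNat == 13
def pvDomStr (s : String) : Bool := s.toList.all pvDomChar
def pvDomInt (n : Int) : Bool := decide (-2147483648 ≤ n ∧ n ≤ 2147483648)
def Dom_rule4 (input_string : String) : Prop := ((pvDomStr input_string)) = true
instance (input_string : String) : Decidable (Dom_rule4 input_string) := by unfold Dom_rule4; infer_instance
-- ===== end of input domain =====

-- B replaces A's reversed scan with quadratic slice rebuilds by one forward pass that
-- compresses each maximal vowel run directly (objective: faster, O(n) vs O(n^2)).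

-- ===== PORT A =====

-- VOWELS = ['a', 'e', 'i', 'o', 'u', 'y']
def pvVOWELS : List Char := ['a', 'e', 'i', 'o', 'u', 'y']

-- 'c in VOWELS'
def pvIsV (c : Char) : Bool := pvVOWELS.contains c

-- the while loop of A over the (reversed) character list; `current` only ever starts at 1
-- and increases, so both indices are in range (proved inline); the slices reversed[:current]
-- and reversed[current+1:] with these nonnegative in-range bounds are exactly take/drop.
def rule4Loop (rev : List Char) (current : Nat) : List Char :=
  if h : current < rev.length then
    if pvIsV (rev[current]'h) && pvIsV (rev[current - 1]'(by omega)) then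
      rule4Loop (rev.take current ++ rev.drop (current + 1)) (current + 1)
    else
      rule4Loop rev (current + 1)
  else rev
termination_by rev.length - current
decreasing_by
  · simp only [List.length_append, List.length_take, List.length_drop]; omega
  · omega

def rule4 (input_string : String) : String :=
  -- reversed = input_string[::-1] ; loop ; return reversed[::-1]
  String.mk (rule4Loop input_string.toList.reverse 1).reverse

-- ===== PORT B =====

-- run[0::2] (every other character, starting with the first)
def pvTakeAlt : List Char → List Char
  | [] => []
  | [c] => [c]
  | c :: _ :: t => c :: pvTakeAlt t

-- the outer while loop of B: copy non-vowels; for a maximal vowel run `run`,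
-- keep run[(len(run)+1) % 2 :: 2]
def pvAltGo : List Char → List Char
  | [] => []
  | c :: t =>
    if pvIsV c then
      (if (c :: t.takeWhile pvIsV).length % 2 == 0
        then pvTakeAlt (t.takeWhile pvIsV)
        else pvTakeAlt (c :: t.takeWhile pvIsV)) ++ pvAltGo (t.dropWhile pvIsV)
    else c :: pvAltGo t
termination_by l => l.length
decreasing_by
  · have := List.length_dropWhile_le pvIsV t; simp; omega
  · simp

def rule4_alt (input_string : String) : String :=
  String.mk (pvAltGo input_string.toList)

-- ===== PRECONDITION & SPEC =====
def Spec_rule4 (input_string : String) (out : String) : Prop := out = rule4_alt input_string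
instance (input_string : String) (out : String) : Decidable (Spec_rule4 input_string out) := by unfold Spec_rule4; infer_instance

-- ===== CLAIM (what is proved, stated in full; the proofs are below) =====
def Claim_equal_rule4 : Prop := ∀ (input_string : String), Dom_rule4 input_string → Spec_rule4 input_string (rule4 input_string)

-- ===== LEMMAS AND PROOFS =====

-- functional form of A's loop: prev kept char `p`, unexamined tail
def pvHA (p : Char) : List Char → List Char
  | [] => []
  | c :: t =>
    if pvIsV p && pvIsV c then
      match t with
      | [] => []
      | d :: t' => d :: pvHA d t'
    else c :: pvHA c t

-- run-based form of A's result on the reversed list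
def pvFwd : List Char → List Char
  | [] => []
  | c :: t =>
    if pvIsV c then
      pvTakeAlt (c :: t.takeWhile pvIsV) ++ pvFwd (t.dropWhile pvIsV)
    else c :: pvFwd t
termination_by l => l.length
decreasing_by
  · have := List.length_dropWhile_le pvIsV t; simp; omega
  · simp


theorem pvDW_head (p : Char → Bool) (c : Char) :
    ∀ (l v : List Char), l.dropWhile p = c :: v → p c = false := by
  intro l
  induction l with
  | nil => intro v h; simp at h
  | cons d t ih =>
    intro v h
    rw [List.dropWhile_cons] at h
    split at h
    · exact ih v h
    · next hd => cases h; simpa using hd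

theorem pvTW_append (c : Char) (hc : pvIsV c = false) :
    ∀ (u v : List Char), (u ++ c :: v).takeWhile pvIsV = u.takeWhile pvIsV := by
  intro u v
  induction u with
  | nil => simp [hc]
  | cons d u' ih => simp [List.takeWhile_cons, ih]

theorem pvDW_append (c : Char) (hc : pvIsV c = false) :
    ∀ (u v : List Char), (u ++ c :: v).dropWhile pvIsV = u.dropWhile pvIsV ++ c :: v := by
  intro u v
  induction u with
  | nil => simp [hc]
  | cons d u' ih =>
    by_cases hd : pvIsV d = true
    · simpa [List.dropWhile_cons, hd] using ih
    · simp [Bool.eq_false_iff.mp (Bool.not_eq_true _ ▸ hd)]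

theorem pvHA_cons (p c : Char) (t : List Char) :
    pvHA p (c :: t) = if pvIsV p && pvIsV c then
      (match t with | [] => [] | d :: t' => d :: pvHA d t')
    else c :: pvHA c t := by
  rw [pvHA.eq_def]

theorem pvLoop_inv : ∀ (n : Nat) (t pre : List Char) (hp : pre ≠ []), t.length ≤ n →
    rule4Loop (pre ++ t) pre.length = pre ++ pvHA (pre.getLast hp) t := by
  have base : ∀ (pre : List Char) (k : Nat), pre.length ≤ k → rule4Loop pre k = pre := by
    intro pre k hk
    rw [rule4Loop.eq_def]
    simp [Nat.not_lt.mpr hk]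
  intro n
  induction n with
  | zero =>
    intro t pre hp ht
    have : t = [] := List.length_eq_zero_iff.mp (Nat.le_zero.mp ht)
    subst this
    simp [base pre pre.length le_rfl, pvHA]
  | succ n ih =>
    intro t pre hp ht
    cases t with
    | nil => simp [base pre pre.length le_rfl, pvHA]
    | cons c t' =>
      simp only [List.length_cons, Nat.add_le_add_iff_right] at ht
      have hpre : 0 < pre.length := List.length_pos_of_ne_nil hp
      have hlen : pre.length < (pre ++ c :: t').length := by simp
      have hget1 : (pre ++ c :: t')[pre.length]'hlen = c := by
        rw [List.getElem_append_right (le_refl pre.length)]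
        simp
      have hget2 : (pre ++ c :: t')[pre.length - 1]'(by omega) = pre.getLast hp := by
        rw [List.getElem_append_left (by omega)]
        exact (List.getLast_eq_getElem hp).symm
      rw [rule4Loop.eq_def, dif_pos hlen]
      simp only [hget1, hget2]
      rw [pvHA_cons]
      by_cases hv : (pvIsV c && pvIsV (pre.getLast hp)) = true
      · rw [if_pos hv, if_pos (by rw [Bool.and_comm] at hv; exact hv)]
        have htake : (pre ++ c :: t').take pre.length = pre := by simp
        have hdrop : (pre ++ c :: t').drop (pre.length + 1) = t' := by
          rw [show pre ++ c :: t' = (pre ++ [c]) ++ t' by simp,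
            show pre.length + 1 = (pre ++ [c]).length by simp]
          simp
        rw [htake, hdrop]
        cases t' with
        | nil =>
          simp only [List.append_nil]
          exact base pre (pre.length + 1) (by omega)
        | cons d t'' =>
          simp only [List.length_cons] at ht
          rw [show pre ++ d :: t'' = (pre ++ [d]) ++ t'' by simp,
            show pre.length + 1 = (pre ++ [d]).length by simp,
            ih t'' (pre ++ [d]) (by simp) (by omega)]
          simp
      · rw [if_neg hv, if_neg (by rw [Bool.and_comm] at hv; exact hv)]
        rw [show pre ++ c :: t' = (pre ++ [c]) ++ t' by simp,
          show pre.length + 1 = (pre ++ [c]).length by simp,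
          ih t' (pre ++ [c]) (by simp) (by omega)]
        simp

theorem pvHA_fwd : ∀ (n : Nat) (t : List Char), t.length ≤ n →
    (∀ p, pvIsV p = false → pvHA p t = pvFwd t) ∧
    (∀ c, pvIsV c = true →
      c :: pvHA c t = pvTakeAlt (c :: t.takeWhile pvIsV) ++ pvFwd (t.dropWhile pvIsV)) := by
  intro n
  induction n with
  | zero =>
    intro t ht
    have : t = [] := List.length_eq_zero_iff.mp (Nat.le_zero.mp ht)
    subst this
    exact ⟨fun p _ => by simp [pvHA, pvFwd],
      fun c _ => by simp [pvHA, pvTakeAlt, pvFwd]⟩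
  | succ n ih =>
    intro t ht
    constructor
    · -- (a) previous kept char is not a vowel: no deletion can fire now
      intro p hp
      cases t with
      | nil => simp [pvHA, pvFwd]
      | cons c t' =>
        simp only [List.length_cons, Nat.add_le_add_iff_right] at ht
        rw [pvHA_cons]
        simp only [hp, Bool.false_and, Bool.false_eq_true, ite_false]
        by_cases hc : pvIsV c = true
        · rw [(ih t' ht).2 c hc, pvFwd]
          simp only [hc, if_pos]
        · have hc' : pvIsV c = false := Bool.eq_false_iff.mpr hc
          rw [(ih t' ht).1 c hc', pvFwd]
          simp only [hc', Bool.false_eq_true, ite_false]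
    · -- (b) previous kept char c is a vowel, describing the rest of its run
      intro c hc
      cases t with
      | nil => simp [pvHA, pvTakeAlt, pvFwd]
      | cons d t' =>
        simp only [List.length_cons, Nat.add_le_add_iff_right] at ht
        by_cases hd : pvIsV d = true
        · -- d is deleted; the next char (if any) is kept unexamined
          rw [pvHA_cons]
          simp only [hc, hd, Bool.and_self, if_pos]
          rw [List.takeWhile_cons_of_pos hd, List.dropWhile_cons_of_pos hd]
          rw [show pvTakeAlt (c :: d :: t'.takeWhile pvIsV) =
              c :: pvTakeAlt (t'.takeWhile pvIsV) from rfl]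
          cases t' with
          | nil => simp [pvTakeAlt, pvFwd]
          | cons e t'' =>
            simp only [List.length_cons] at ht
            by_cases he : pvIsV e = true
            · rw [List.takeWhile_cons_of_pos he, List.dropWhile_cons_of_pos he]
              have hb := (ih t'' (by omega)).2 e he
              rw [List.cons_append, ← hb]
            · have he' : pvIsV e = false := Bool.eq_false_iff.mpr he
              rw [List.takeWhile_cons_of_neg (by simp [he']),
                List.dropWhile_cons_of_neg (by simp [he'])]
              have ha := (ih t'' (by omega)).1 e he'
              rw [pvFwd]
              simp only [he', Bool.false_eq_true, ite_false]
              rw [ha]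
              simp [pvTakeAlt]
        · -- d is not a vowel: run of c ends here
          have hd' : pvIsV d = false := Bool.eq_false_iff.mpr hd
          rw [pvHA_cons]
          simp only [hd', Bool.and_false, Bool.false_eq_true, ite_false]
          rw [List.takeWhile_cons_of_neg (by simp [hd']),
            List.dropWhile_cons_of_neg (by simp [hd'])]
          have ha := (ih t' ht).1 d hd'
          rw [pvFwd]
          simp only [hd', Bool.false_eq_true, ite_false]
          rw [ha]
          simp [pvTakeAlt]

theorem pvTakeAlt_cons_tail (c : Char) (w : List Char) :
    pvTakeAlt (c :: w) = c :: pvTakeAlt w.tail := by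
  cases w <;> simp [pvTakeAlt]

theorem pvTakeAlt_append_singleton (v : List Char) (x : Char) :
    pvTakeAlt (v ++ [x]) =
      if v.length % 2 == 0 then pvTakeAlt v ++ [x] else pvTakeAlt v := by
  induction v using pvTakeAlt.induct with
  | case1 => simp [pvTakeAlt]
  | case2 c => simp [pvTakeAlt]
  | case3 c d t ih =>
    simp only [List.cons_append, pvTakeAlt, ih, List.length_cons]
    have h2 : (t.length + 1 + 1) % 2 = t.length % 2 := by omega
    rw [h2]
    split_ifs <;> simp [pvTakeAlt]

theorem pvTakeAlt_rev (w : List Char) :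
    (pvTakeAlt w.reverse).reverse =
      if w.length % 2 == 0 then pvTakeAlt w.tail else pvTakeAlt w := by
  induction w with
  | nil => simp [pvTakeAlt]
  | cons c w ih =>
    rw [List.reverse_cons, pvTakeAlt_append_singleton]
    rcases Nat.even_or_odd w.length with h | h
    · have h0 : w.length % 2 = 0 := Nat.even_iff.mp h
      have h1 : (w.length + 1) % 2 = 1 := by omega
      simp only [List.length_reverse, h0] at ih ⊢
      simp only [List.length_cons, h1]
      simp [ih, pvTakeAlt_cons_tail c w]
    · have h1 : w.length % 2 = 1 := Nat.odd_iff.mp h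
      have h0 : (w.length + 1) % 2 = 0 := by omega
      simp only [List.length_reverse, h1] at ih ⊢
      simp only [List.length_cons, h0]
      simp [ih]

theorem pvAltGo_split : ∀ (n : Nat) (u : List Char), u.length ≤ n → ∀ (c : Char) (v : List Char),
    pvIsV c = false → pvAltGo (u ++ c :: v) = pvAltGo u ++ pvAltGo (c :: v) := by
  intro n
  induction n with
  | zero =>
    intro u hu c v hc
    have : u = [] := List.length_eq_zero_iff.mp (Nat.le_zero.mp hu)
    subst this; simp [pvAltGo]
  | succ n ih =>
    intro u hu c v hc
    cases u with
    | nil => simp [pvAltGo]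
    | cons d u' =>
      simp only [List.length_cons, Nat.add_le_add_iff_right] at hu
      by_cases hd : pvIsV d = true
      · rw [List.cons_append, pvAltGo, pvAltGo]
        simp only [hd, if_pos]
        rw [pvTW_append c hc, pvDW_append c hc,
          ih (u'.dropWhile pvIsV) (le_trans (List.length_dropWhile_le _ _) hu) c v hc,
          List.append_assoc]
      · have hd' : pvIsV d = false := Bool.eq_false_iff.mpr hd
        rw [List.cons_append, pvAltGo, pvAltGo]
        simp only [hd', Bool.false_eq_true, ite_false]
        rw [ih u' hu c v hc, List.cons_append]

-- a nonempty all-vowel run, reversed, through pvAltGo: the reverse of run[0::2]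
theorem pvAltGo_vowel_run : ∀ (r : List Char), (∀ x ∈ r, pvIsV x = true) → r ≠ [] →
    pvAltGo r.reverse = (pvTakeAlt r).reverse := by
  intro r hall hne
  cases hrev : r.reverse with
  | nil => simp at hrev; exact absurd hrev hne
  | cons d w' =>
    have hmem : ∀ x ∈ d :: w', pvIsV x = true := by
      intro x hx; exact hall x (by rw [← List.mem_reverse, hrev]; exact hx)
    have hd : pvIsV d = true := hmem d (by simp)
    have htw : w'.takeWhile pvIsV = w' :=
      List.takeWhile_eq_self_iff.mpr (fun x hx => hmem x (by simp [hx]))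
    have hdw : w'.dropWhile pvIsV = [] :=
      List.dropWhile_eq_nil_iff.mpr (fun x hx => by simp [hmem x (by simp [hx])])
    have h2 := pvTakeAlt_rev r.reverse
    rw [List.reverse_reverse, hrev] at h2
    rw [pvAltGo]
    simp only [hd, if_pos, htw, hdw]
    rw [h2]
    simp [pvAltGo]

theorem pvFwd_rev : ∀ (n : Nat) (l : List Char), l.length ≤ n →
    (pvFwd l).reverse = pvAltGo l.reverse := by
  intro n
  induction n with
  | zero =>
    intro l hl
    have : l = [] := List.length_eq_zero_iff.mp (Nat.le_zero.mp hl)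
    subst this; simp [pvFwd, pvAltGo]
  | succ n ih =>
    intro l hl
    cases l with
    | nil => simp [pvFwd, pvAltGo]
    | cons c t =>
      simp only [List.length_cons, Nat.add_le_add_iff_right] at hl
      by_cases hc : pvIsV c = true
      · -- vowel head: run = c :: takeWhile, remainder = dropWhile
        have hrun : ∀ x ∈ c :: t.takeWhile pvIsV, pvIsV x = true := by
          intro x hx
          rcases List.mem_cons.mp hx with h | h
          · subst h; exact hc
          · exact List.mem_takeWhile_imp h
        have hrest : (t.dropWhile pvIsV).length ≤ n :=
          le_trans (List.length_dropWhile_le _ _) hl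
        have hsplit : (c :: t).reverse =
            (t.dropWhile pvIsV).reverse ++ (c :: t.takeWhile pvIsV).reverse := by
          conv_lhs => rw [List.reverse_cons,
            ← List.takeWhile_append_dropWhile (p := pvIsV) (l := t)]
          simp only [List.reverse_append, List.reverse_cons, List.append_assoc]
        have key : pvAltGo ((c :: t).reverse) =
            pvAltGo (t.dropWhile pvIsV).reverse ++ (pvTakeAlt (c :: t.takeWhile pvIsV)).reverse := by
          rw [hsplit]
          cases hdw : t.dropWhile pvIsV with
          | nil =>
            rw [show ([] : List Char).reverse ++ (c :: t.takeWhile pvIsV).reverse =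
                (c :: t.takeWhile pvIsV).reverse by simp]
            rw [pvAltGo_vowel_run _ hrun (by simp)]
            simp [pvAltGo]
          | cons r0 rest' =>
            have hr0 : pvIsV r0 = false := pvDW_head pvIsV r0 t rest' hdw
            have e1 : (r0 :: rest').reverse ++ (c :: t.takeWhile pvIsV).reverse =
                rest'.reverse ++ (r0 :: (c :: t.takeWhile pvIsV).reverse) := by
              rw [List.reverse_cons, List.append_assoc, List.singleton_append]
            rw [e1, pvAltGo_split rest'.reverse.length _ le_rfl r0 _ hr0]
            have e2 : pvAltGo (r0 :: (c :: t.takeWhile pvIsV).reverse) =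
                r0 :: pvAltGo ((c :: t.takeWhile pvIsV).reverse) := by
              rw [pvAltGo]; simp [hr0]
            rw [e2, pvAltGo_vowel_run _ hrun (by simp)]
            have e3 : (r0 :: rest').reverse = rest'.reverse ++ (r0 :: ([] : List Char)) := by
              rw [List.reverse_cons]
            rw [e3, pvAltGo_split rest'.reverse.length _ le_rfl r0 [] hr0]
            rw [show pvAltGo (r0 :: ([] : List Char)) = [r0] by rw [pvAltGo]; simp [hr0, pvAltGo]]
            rw [List.append_assoc, List.singleton_append]
        rw [pvFwd]
        simp only [hc, if_pos]
        rw [List.reverse_append, ih _ hrest, key]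
      · have hc' : pvIsV c = false := Bool.eq_false_iff.mpr hc
        rw [pvFwd]
        simp only [hc', Bool.false_eq_true, ite_false]
        rw [List.reverse_cons, List.reverse_cons,
          pvAltGo_split t.reverse.length _ le_rfl c [] hc', ih t hl]
        simp [pvAltGo, hc']

-- ===== VERDICT (by name: the statement is the Claim_ definition above) =====
theorem rule4_spec : Claim_equal_rule4 := by
  intro s _
  unfold Spec_rule4 rule4 rule4_alt
  cases hl : s.toList.reverse with
  | nil =>
    have hs : s.toList = [] := by simpa using congrArg List.reverse hl
    have h0 : rule4Loop [] 1 = [] := by rw [rule4Loop.eq_def]; simp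
    rw [h0, hs]
    simp [pvAltGo]
  | cons a t =>
    have h1 : rule4Loop (a :: t) 1 = a :: pvHA a t := by
      simpa using pvLoop_inv t.length t [a] (by simp) le_rfl
    have h2 : a :: pvHA a t = pvFwd (a :: t) := by
      by_cases ha : pvIsV a = true
      · rw [(pvHA_fwd t.length t le_rfl).2 a ha, pvFwd]
        simp only [ha, if_pos]
      · have ha' : pvIsV a = false := Bool.eq_false_iff.mpr ha
        rw [pvFwd]
        simp only [ha', Bool.false_eq_true, ite_false]
        rw [(pvHA_fwd t.length t le_rfl).1 a ha']
    have h4 : (a :: t).reverse = s.toList := by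
      rw [← hl, List.reverse_reverse]
    rw [h1, h2, pvFwd_rev (a :: t).length (a :: t) le_rfl, h4]
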